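-- pv_equiv track=rewrite | github.com/egargo/study | codewars/python/coding_meetup_8.py | all_continents
-- ===== SOURCE A (Python) =====
-- def all_continents(lst):
--     continent = [ 'Africa', 'Americas', 'Asia', 'Europe', 'Oceania' ]
--
--     dev_cont = [devs.get('continent') for devs in lst]
--
--     map_cont = {}
--     for cont in dev_cont:
--         if cont in continent:
--             if cont in map_cont.keys():
--                 map_cont[cont] += 1
--             else:
--                 map_cont[cont] = 1
--
--     check_cont = sum([1 for cont in map_cont.items() if cont[0] in continent and cont[1] >= 1])
--
--     return True if check_cont >= 5 else False
-- ===== SOURCE B (Python) =====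
-- def all_continents(lst):
--     seen = {d.get('continent') for d in lst}
--     return {'Africa', 'Americas', 'Asia', 'Europe', 'Oceania'} <= seen
-- ===== Notes on version B (the rewrite author's own statement) =====
-- stated objective: simpler
-- what changed: B replaces A's per-continent count dictionary (built in a guarded loop) plus a second summation pass over its items with a single set-comprehension of the continents seen and one subset test; no counting is maintained at all.
import Mathlib
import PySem

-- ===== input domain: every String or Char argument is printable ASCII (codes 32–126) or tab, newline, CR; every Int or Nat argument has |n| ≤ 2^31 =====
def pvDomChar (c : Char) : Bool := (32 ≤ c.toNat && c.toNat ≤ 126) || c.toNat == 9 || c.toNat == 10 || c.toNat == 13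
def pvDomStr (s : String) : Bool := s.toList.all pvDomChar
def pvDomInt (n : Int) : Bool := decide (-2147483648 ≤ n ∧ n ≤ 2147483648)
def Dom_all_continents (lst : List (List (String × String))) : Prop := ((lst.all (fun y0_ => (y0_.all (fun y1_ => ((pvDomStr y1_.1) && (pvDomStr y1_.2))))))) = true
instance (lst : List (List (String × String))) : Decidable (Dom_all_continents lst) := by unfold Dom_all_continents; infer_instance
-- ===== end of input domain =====

-- B replaces A's guarded count-dictionary loop plus a second summation pass over its items
-- by one set of the continents seen and a subset test; same return value, no counting kept.

-- ===== PORT A =====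
-- A-side helpers: the literal continent list and the body of A's 'for cont in dev_cont' loop.
def pvContinent : List String := ["Africa", "Americas", "Asia", "Europe", "Oceania"]

def pvStepA (d : PySem.Dict String Int) (cont : Option String) : PySem.Dict String Int :=
  match cont with
  | some c =>
      if pvContinent.contains c then
        if d.contains c then d.insert c (d.getD c 0 + 1) else d.insert c 1
      else d
  | none => d

def all_continents (lst : List (List (String × String))) : Bool :=
  let continent := pvContinent
  let dev_cont : List (Option String) :=
    lst.map (fun devs => (PySem.Dict.mk devs).get? "continent")
  let map_cont : PySem.Dict String Int := dev_cont.foldl pvStepA PySem.Dict.empty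
  let check_cont : Int :=
    ((map_cont.items.filter (fun p => continent.contains p.1 && decide (p.2 ≥ 1))).map
      (fun _ => (1 : Int))).sum
  if check_cont ≥ 5 then true else false

-- ===== PORT B =====
def all_continents_alt (lst : List (List (String × String))) : Bool :=
  let seen : PySem.Set (Option String) :=
    PySem.Set.ofList (lst.map (fun d => (PySem.Dict.mk d).get? "continent"))
  PySem.Set.issubset
    (PySem.Set.ofList [some "Africa", some "Americas", some "Asia", some "Europe", some "Oceania"])
    seen

-- ===== PRECONDITION & SPEC =====
def Spec_all_continents (lst : List (List (String × String))) (out : Bool) : Prop := out = all_continents_alt lst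
instance (lst : List (List (String × String))) (out : Bool) : Decidable (Spec_all_continents lst out) := by unfold Spec_all_continents; infer_instance

-- ===== CLAIM (what is proved, stated in full; the proofs are below) =====
def Claim_equal_all_continents : Prop := ∀ (lst : List (List (String × String))), Dom_all_continents lst → Spec_all_continents lst (all_continents lst)

-- ===== LEMMAS AND PROOFS =====

-- A's loop registers exactly the valid continents that occur in the processed prefix.
theorem pvFoldA_contains (l : List (Option String)) :
    ∀ (d : PySem.Dict String Int) (c : String),
      ((l.foldl pvStepA d).contains c = true ↔
        d.contains c = true ∨ (some c ∈ l ∧ c ∈ pvContinent)) := by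
  induction l with
  | nil => simp
  | cons x l ih =>
      intro d c
      rw [List.foldl_cons, ih]
      cases x with
      | none => simp [pvStepA]
      | some s =>
          have hcons : ∀ P Q : Prop, ((some c ∈ some s :: l ∧ c ∈ pvContinent) ↔
              ((c = s ∧ c ∈ pvContinent) ∨ (some c ∈ l ∧ c ∈ pvContinent))) := by
            intro _ _
            constructor
            · rintro ⟨hm, hc⟩
              rcases List.mem_cons.mp hm with he | hm'
              · exact Or.inl ⟨by injection he, hc⟩
              · exact Or.inr ⟨hm', hc⟩
            · rintro (⟨rfl, hc⟩ | ⟨hm, hc⟩)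
              · exact ⟨List.mem_cons_self .., hc⟩
              · exact ⟨List.mem_cons_of_mem _ hm, hc⟩
          rw [hcons True True]
          simp only [pvStepA]
          by_cases hs : pvContinent.contains s = true
          · rw [if_pos hs]
            have hsmem : s ∈ pvContinent := by simpa using hs
            have hstep : ∀ v, ((d.insert s v).contains c = true ↔ c = s ∨ d.contains c = true) := by
              intro v
              simp [PySem.Dict.contains_insert]
            by_cases hd : d.contains s = true
            · rw [if_pos hd, hstep]
              constructor
              · rintro ((rfl | h) | h)
                · exact Or.inr (Or.inl ⟨rfl, hsmem⟩)
                · exact Or.inl h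
                · exact Or.inr (Or.inr h)
              · rintro (h | (⟨rfl, _⟩ | h))
                · exact Or.inl (Or.inr h)
                · exact Or.inl (Or.inl rfl)
                · exact Or.inr h
            · rw [if_neg hd, hstep]
              constructor
              · rintro ((rfl | h) | h)
                · exact Or.inr (Or.inl ⟨rfl, hsmem⟩)
                · exact Or.inl h
                · exact Or.inr (Or.inr h)
              · rintro (h | (⟨rfl, _⟩ | h))
                · exact Or.inl (Or.inr h)
                · exact Or.inl (Or.inl rfl)
                · exact Or.inr h
          · rw [if_neg hs]
            constructor
            · rintro (h | h)
              · exact Or.inl h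
              · exact Or.inr (Or.inr h)
            · rintro (h | (⟨rfl, hc⟩ | h))
              · exact Or.inl h
              · exact absurd (by simpa using hc) hs
              · exact Or.inr h

-- every entry of A's map has a valid continent key and a count ≥ 1
theorem pvFoldA_items (l : List (Option String)) :
    ∀ (d : PySem.Dict String Int),
      (∀ p ∈ d.items, p.1 ∈ pvContinent ∧ 1 ≤ p.2) →
      ∀ p ∈ (l.foldl pvStepA d).items, p.1 ∈ pvContinent ∧ 1 ≤ p.2 := by
  induction l with
  | nil => intro d h; simpa using h
  | cons x l ih =>
      intro d h
      rw [List.foldl_cons]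
      apply ih
      cases x with
      | none => exact h
      | some s =>
          simp only [pvStepA]
          by_cases hs : pvContinent.contains s = true
          · rw [if_pos hs]
            have hsmem : s ∈ pvContinent := by simpa using hs
            by_cases hd : d.contains s = true
            · rw [if_pos hd]
              intro p hp
              rcases (PySem.Dict.mem_items_insert _ _ _ _).mp hp with rfl | ⟨hpd, _⟩
              · refine ⟨hsmem, ?_⟩
                have hg : (d.get? s).isSome := by
                  rw [← PySem.Dict.contains_eq_isSome_get?, hd]
                rcases Option.isSome_iff_exists.mp hg with ⟨v, hv⟩
                have hmem := PySem.Dict.mem_items_of_get?_eq_some _ hv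
                have := (h _ hmem).2
                have hgd : d.getD s 0 = v := by
                  rw [PySem.Dict.getD_eq_get?_getD, hv]; rfl
                simp only [hgd]
                omega
              · exact h _ hpd
            · rw [if_neg hd]
              intro p hp
              rcases (PySem.Dict.mem_items_insert _ _ _ _).mp hp with rfl | ⟨hpd, _⟩
              · exact ⟨hsmem, le_refl 1⟩
              · exact h _ hpd
          · rw [if_neg hs]
            exact h

theorem pvFoldA_nodup (l : List (Option String)) :
    ∀ (d : PySem.Dict String Int), d.keys.Nodup → (l.foldl pvStepA d).keys.Nodup := by
  induction l with
  | nil => intro d h; simpa using h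
  | cons x l ih =>
      intro d h
      rw [List.foldl_cons]
      apply ih
      cases x with
      | none => exact h
      | some s =>
          simp only [pvStepA]
          split_ifs <;> first
            | exact PySem.Dict.nodup_keys_insert _ _ _ h
            | exact h

theorem pvSumOnes {α : Type} (l : List α) : (l.map (fun _ => (1 : Int))).sum = l.length := by
  induction l with
  | nil => simp
  | cons x l ih =>
      rw [List.map_cons, List.sum_cons, ih]
      simp only [List.length_cons]
      push_cast
      omega

-- ===== VERDICT (by name: the statement is the Claim_ definition above) =====
theorem all_continents_spec : Claim_equal_all_continents := by
  intro lst _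
  unfold Spec_all_continents all_continents all_continents_alt
  simp only []
  set L : List (Option String) := lst.map (fun devs => (PySem.Dict.mk devs).get? "continent") with hL
  set M : PySem.Dict String Int := L.foldl pvStepA PySem.Dict.empty with hM
  have hitems : ∀ p ∈ M.items, p.1 ∈ pvContinent ∧ 1 ≤ p.2 := by
    apply pvFoldA_items
    intro p hp
    simp [PySem.Dict.empty] at hp
  have hnodup : M.keys.Nodup := by
    apply pvFoldA_nodup
    simp [PySem.Dict.empty]
  have hconts : ∀ c : String, (M.contains c = true ↔ some c ∈ L ∧ c ∈ pvContinent) := by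
    intro c
    rw [hM, pvFoldA_contains]
    simp [PySem.Dict.empty, PySem.Dict.contains]
  -- the filter keeps every item, so check_cont is the number of keys
  have hfilter :
      M.items.filter (fun p => pvContinent.contains p.1 && decide (p.2 ≥ 1)) = M.items := by
    apply List.filter_eq_self.mpr
    intro p hp
    rcases hitems p hp with ⟨h1, h2⟩
    simp [h1, h2]
  have hcheck :
      ((M.items.filter (fun p => pvContinent.contains p.1 && decide (p.2 ≥ 1))).map
        (fun _ => (1 : Int))).sum = (M.keys.length : Int) := by
    rw [hfilter, pvSumOnes]
    simp [PySem.Dict.keys]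
  -- characterise each side as "all five continents occur in L"
  have hkeys_mem : ∀ c : String, (c ∈ M.keys ↔ some c ∈ L ∧ c ∈ pvContinent) := by
    intro c
    rw [← PySem.Dict.contains_iff_mem_keys, hconts]
  have hkeys_sub : ∀ c ∈ M.keys, c ∈ pvContinent := fun c hc => ((hkeys_mem c).mp hc).2
  have hmain : (5 ≤ M.keys.length) ↔ (∀ c ∈ pvContinent, some c ∈ L) := by
    constructor
    · intro hlen c hc
      have hsub : M.keys.toFinset ⊆ pvContinent.toFinset := by
        intro x hx
        exact List.mem_toFinset.mpr (hkeys_sub x (List.mem_toFinset.mp hx))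
      have hcard : pvContinent.toFinset.card ≤ M.keys.toFinset.card := by
        have h1 : M.keys.toFinset.card = M.keys.length := List.toFinset_card_of_nodup hnodup
        have h2 : pvContinent.toFinset.card = 5 := by decide
        omega
      have heq := Finset.eq_of_subset_of_card_le hsub hcard
      have : c ∈ M.keys.toFinset := by rw [heq]; exact List.mem_toFinset.mpr hc
      exact ((hkeys_mem c).mp (List.mem_toFinset.mp this)).1
    · intro hall
      have hsub : pvContinent.toFinset ⊆ M.keys.toFinset := by
        intro x hx
        have hxc := List.mem_toFinset.mp hx
        exact List.mem_toFinset.mpr ((hkeys_mem x).mpr ⟨hall x hxc, hxc⟩)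
      have h1 : M.keys.toFinset.card = M.keys.length := List.toFinset_card_of_nodup hnodup
      have h2 : pvContinent.toFinset.card = 5 := by decide
      have := Finset.card_le_card hsub
      have := List.toFinset_card_le M.keys
      omega
  have hB : (PySem.Set.issubset
      (PySem.Set.ofList [some "Africa", some "Americas", some "Asia", some "Europe", some "Oceania"])
      (PySem.Set.ofList L) = true) ↔ (∀ c ∈ pvContinent, some c ∈ L) := by
    rw [PySem.Set.issubset_iff]
    constructor
    · intro h c hc
      have : some c ∈ PySem.Set.ofList L := by
        apply h
        rw [PySem.Set.mem_ofList]
        fin_cases hc <;> simp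
      rw [PySem.Set.mem_ofList] at this
      exact this
    · intro h x hx
      rw [PySem.Set.mem_ofList] at hx ⊢
      fin_cases hx <;>
        [exact h "Africa" (by decide); exact h "Americas" (by decide);
         exact h "Asia" (by decide); exact h "Europe" (by decide);
         exact h "Oceania" (by decide)]
  rw [hcheck]
  rw [Bool.eq_iff_iff]
  rw [hB, ← hmain]
  by_cases hif : ((M.keys.length : Int) ≥ 5)
  · rw [if_pos hif]
    exact iff_of_true rfl (by exact_mod_cast hif)
  · rw [if_neg hif]
    exact iff_of_false (by simp) (fun hc => hif (by exact_mod_cast hc))
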